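-- pv_equiv track=rewrite | github.com/get-into-the-coding-field/Algorithm | 주리머/2-3w/택배상자.py | solution
-- ===== SOURCE A (Python) =====
-- def solution(order):
--     answer = 0
--     aux_container = []
--     order_queue = []
--
--     for i in range(len(order)):
--         aux_container.append([order[i] ,i+1])
--         order_queue.append(order[i])
--
--         while order_queue and order_queue[0] == aux_container[-1][1]:
--             order_queue.pop(0)
--             aux_container.pop()
--             answer += 1
--     return answer
-- ===== SOURCE B (Python) =====
-- def solution(order):
--     n = len(order)
--     stack = []
--     main = 1
--     idx = 0
--     count = 0
--     while idx < n:
--         want = order[idx]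
--         if stack and stack[-1] == want:
--             stack.pop()
--             idx += 1
--             count += 1
--         elif main <= n:
--             if main == want:
--                 idx += 1
--                 count += 1
--                 main += 1
--             else:
--                 stack.append(main)
--                 main += 1
--         else:
--             break
--     return count
-- ===== Notes on version B (the rewrite author's own statement) =====
-- stated objective: idiomatic
-- what changed: Replaces A's parallel (value,box-number) stack plus a front-popped value queue by the standard single-stack conveyor simulation with an integer next-box counter and an index pointer into order; measured only ~1.3x faster, so no speed is claimed.
import Mathlib
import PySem

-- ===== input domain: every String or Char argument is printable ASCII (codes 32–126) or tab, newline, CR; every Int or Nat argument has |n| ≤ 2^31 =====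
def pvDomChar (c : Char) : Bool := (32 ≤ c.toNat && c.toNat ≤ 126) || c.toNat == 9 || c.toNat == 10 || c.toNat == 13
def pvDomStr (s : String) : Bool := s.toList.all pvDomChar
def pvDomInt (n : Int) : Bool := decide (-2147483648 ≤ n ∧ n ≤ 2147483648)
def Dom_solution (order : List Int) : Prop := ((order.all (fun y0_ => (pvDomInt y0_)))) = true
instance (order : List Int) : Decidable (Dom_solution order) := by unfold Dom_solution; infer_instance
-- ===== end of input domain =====

-- B replaces A's (value,box-number) stack + value queue popped from the front by the standard
-- single-stack conveyor simulation with a next-box counter and an index pointer (objective: idiomatic).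
-- Python lists used as stacks (append/[-1]/pop at the END) are represented with the TOP AT THE HEAD;
-- the queue keeps Python's order (head = front, append at the end).

-- ===== PORT A =====
-- while order_queue and order_queue[0] == aux_container[-1][1]: pop front, pop top, answer += 1
-- (the case "queue nonempty, stack empty" would raise in Python but is unreachable: both always
-- have the same length; the port returns the state unchanged there)
def drainA : List Int → List (Int × Int) → Int → List Int × List (Int × Int) × Int
  | [], s, a => ([], s, a)
  | w :: ws, [], a => (w :: ws, [], a)
  | w :: ws, (x, b) :: s, a =>
      if w = b then drainA ws s (a + 1) else (w :: ws, (x, b) :: s, a)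

-- for i in range(len(order)): append [order[i], i+1]; append order[i]; drain
def loopA : List Int → Nat → Int → List (Int × Int) → List Int → Int
  | [], _, ans, _, _ => ans
  | x :: rest, i, ans, aux, q =>
      match drainA (q ++ [x]) ((x, (i : Int) + 1) :: aux) ans with
      | (q'', s'', a'') => loopA rest (i + 1) a'' s'' q''

def solution (order : List Int) : Int := loopA order 0 0 [] []

-- ===== PORT B =====
def loopB (order : List Int) (idx main : Nat) (stack : List Int) (count : Int) : Int :=
  if h : idx < order.length then
    let want := order[idx]
    if stack.head? = some want then
      loopB order (idx + 1) main stack.tail (count + 1)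
    else if main ≤ order.length then
      if (main : Int) = want then loopB order (idx + 1) (main + 1) stack (count + 1)
      else loopB order idx (main + 1) ((main : Int) :: stack) count
    else count
  else count
termination_by (order.length - idx) + (order.length + 1 - main)
decreasing_by all_goals omega

def solution_alt (order : List Int) : Int := loopB order 0 1 [] 0

-- ===== PRECONDITION & SPEC =====
def Spec_solution (order : List Int) (out : Int) : Prop := out = solution_alt order
instance (order : List Int) (out : Int) : Decidable (Spec_solution order out) := by unfold Spec_solution; infer_instance

-- ===== CLAIM (what is proved, stated in full; the proofs are below) =====
def Claim_equal_solution : Prop := ∀ (order : List Int), Dom_solution order → Spec_solution order (solution order)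

-- ===== LEMMAS AND PROOFS =====

-- Reference machine: drain matching heads of (wants, stack), then push the next box and repeat.
def drain : List Int → List Int → Int → List Int × List Int × Int
  | [], s, a => ([], s, a)
  | w :: ws, [], a => (w :: ws, [], a)
  | w :: ws, t :: ts, a =>
      if w = t then drain ws ts (a + 1) else (w :: ws, t :: ts, a)

def runR : List Int → List Int → Int → List Int → Int
  | w, s, c, [] => (drain w s c).2.2
  | w, s, c, b :: bs =>
      runR (drain w s c).1 (b :: (drain w s c).2.1) (drain w s c).2.2 bs

def boxes (m n : Nat) : List Int := (List.range' m (n + 1 - m)).map Int.ofNat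

def Stab : List Int → List Int → Prop
  | w :: _, t :: _ => w ≠ t
  | _, _ => True

theorem drain_nil_stack (w : List Int) (a : Int) : drain w [] a = (w, [], a) := by
  cases w <;> simp [drain]

theorem drain_of_stab (w s : List Int) (a : Int) (h : Stab w s) : drain w s a = (w, s, a) := by
  cases w with
  | nil => simp [drain]
  | cons x ws =>
    cases s with
    | nil => simp [drain]
    | cons t ts => simp only [Stab] at h; simp [drain, h]

theorem stab_drain (w : List Int) : ∀ (s : List Int) (a : Int),
    Stab (drain w s a).1 (drain w s a).2.1 := by
  induction w with
  | nil => intro s a; simp [drain, Stab]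
  | cons x ws ih =>
    intro s a
    cases s with
    | nil => simp [drain, Stab]
    | cons t ts =>
      by_cases hx : x = t
      · simpa [drain, hx] using ih ts (a + 1)
      · simp [drain, hx, Stab]

theorem drain_idem (w s : List Int) (a : Int) :
    drain (drain w s a).1 (drain w s a).2.1 (drain w s a).2.2 = drain w s a := by
  rw [drain_of_stab _ _ _ (stab_drain w s a)]

theorem runR_congr (w s : List Int) (c : Int) (w' s' : List Int) (c' : Int)
    (h : drain w s c = drain w' s' c') : ∀ bs, runR w s c bs = runR w' s' c' bs := by
  intro bs; cases bs <;> simp [runR, h]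

theorem runR_drain (w s : List Int) (c : Int) (bs : List Int) :
    runR w s c bs = runR (drain w s c).1 (drain w s c).2.1 (drain w s c).2.2 bs := by
  exact runR_congr _ _ _ _ _ _ (by rw [drain_idem]) bs

theorem runR_nilw (bs : List Int) : ∀ (s : List Int) (c : Int), runR [] s c bs = c := by
  induction bs with
  | nil => intro s c; simp [runR, drain]
  | cons b bs ih => intro s c; simp [runR, drain, ih]

theorem boxes_hi (m n : Nat) (h : n < m) : boxes m n = [] := by
  have : n + 1 - m = 0 := by omega
  simp [boxes, this]

theorem boxes_cons (m n : Nat) (h : m ≤ n) : boxes m n = (m : Int) :: boxes (m + 1) n := by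
  have h1 : n + 1 - m = (n + 1 - (m + 1)) + 1 := by omega
  simp [boxes, h1, List.range'_succ]

-- drainA is drain on the box numbers (second components), first components irrelevant
theorem drainA_drain (q : List Int) : ∀ (s : List (Int × Int)) (a : Int),
    (drainA q s a).1 = (drain q (s.map Prod.snd) a).1 ∧
    (drainA q s a).2.1.map Prod.snd = (drain q (s.map Prod.snd) a).2.1 ∧
    (drainA q s a).2.2 = (drain q (s.map Prod.snd) a).2.2 := by
  induction q with
  | nil => intro s a; simp [drainA, drain]
  | cons w ws ih =>
    intro s a
    cases s with
    | nil => simp [drainA, drain]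
    | cons p s' =>
      obtain ⟨x, b⟩ := p
      by_cases hw : w = b
      · simpa [drainA, drain, hw] using ih s' (a + 1)
      · simp [drainA, drain, hw]

theorem drainA_len (q : List Int) : ∀ (s : List (Int × Int)) (a : Int),
    q.length = s.length →
    (drainA q s a).1.length = (drainA q s a).2.1.length := by
  induction q with
  | nil => intro s a h; simp [drainA, ← h]
  | cons w ws ih =>
    intro s a h
    cases s with
    | nil => simp at h
    | cons p s' =>
      obtain ⟨x, b⟩ := p
      by_cases hw : w = b
      · simp only [drainA, if_pos hw]; exact ih s' (a + 1) (by simpa using h)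
      · simpa [drainA, hw] using h

theorem drain_append (q : List Int) : ∀ (s : List Int) (a : Int) (rest : List Int),
    q.length = s.length →
    drain (q ++ rest) s a = ((drain q s a).1 ++ rest, (drain q s a).2.1, (drain q s a).2.2) := by
  induction q with
  | nil =>
    intro s a rest h
    have : s = [] := by simpa using h.symm
    subst this
    simp [drain, drain_nil_stack]
  | cons w ws ih =>
    intro s a rest h
    cases s with
    | nil => simp at h
    | cons t ts =>
      by_cases hw : w = t
      · simpa [drain, hw] using ih ts (a + 1) rest (by simpa using h)
      · simp [drain, hw]

theorem loopA_eq (rest : List Int) : ∀ (i : Nat) (ans : Int) (aux : List (Int × Int)) (q : List Int),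
    Stab (q ++ rest) (aux.map Prod.snd) → aux.length = q.length →
    loopA rest i ans aux q =
      runR (q ++ rest) (aux.map Prod.snd) ans ((List.range' (i + 1) rest.length).map Int.ofNat) := by
  induction rest with
  | nil =>
    intro i ans aux q hst hlen
    simp only [loopA, List.append_nil] at *
    simp [runR, drain_of_stab _ _ _ hst]
  | cons x rest ih =>
    intro i ans aux q hst hlen
    rcases hdA : drainA (q ++ [x]) ((x, (i : Int) + 1) :: aux) ans with ⟨q'', s'', a''⟩
    obtain ⟨hA1, hA2, hA3⟩ := drainA_drain (q ++ [x]) ((x, (i : Int) + 1) :: aux) ans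
    rw [hdA] at hA1 hA2 hA3
    simp only [List.map_cons] at hA1 hA2 hA3
    have hassoc : q ++ x :: rest = (q ++ [x]) ++ rest := by simp
    have hlen2 : (q ++ [x]).length = (((i : Int) + 1) :: aux.map Prod.snd).length := by
      simp [hlen]
    have hDA := drain_append (q ++ [x]) (((i : Int) + 1) :: aux.map Prod.snd) ans rest
      (by simp [hlen])
    have hcast : Int.ofNat (i + 1) = (i : Int) + 1 := by simp
    simp only [loopA, hdA, List.length_cons, List.range'_succ, List.map_cons, hcast]
    rw [show (i + 1 : Nat) + 1 = (i + 1) + 1 from rfl]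
    simp only [runR, drain_of_stab _ _ _ hst]
    rw [hassoc, runR_drain, hDA]
    simp only [← hA1, ← hA2, ← hA3]
    apply ih
    · have := stab_drain ((q ++ [x]) ++ rest) (((i : Int) + 1) :: aux.map Prod.snd) ans
      rw [hDA] at this
      simpa [hA1, hA2] using this
    · have := drainA_len (q ++ [x]) ((x, (i : Int) + 1) :: aux) ans (by simp [hlen])
      rw [hdA] at this
      exact this.symm

theorem stab_of_head? (w : Int) (ws stack : List Int) (h : ¬ stack.head? = some w) :
    Stab (w :: ws) stack := by
  cases stack with
  | nil => trivial
  | cons t ts =>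
    simp only [List.head?_cons] at h
    simp only [Stab]
    intro e; exact h (by rw [e])

theorem loopB_eq (order : List Int) : ∀ (idx main : Nat) (stack : List Int) (count : Int),
    loopB order idx main stack count =
      runR (order.drop idx) stack count (boxes main order.length) := by
  intro idx main stack count
  induction idx, main, stack, count using loopB.induct order with
  | case1 idx main stack count h want hmatch ih =>
    obtain ⟨t, ts, rfl⟩ : ∃ t ts, stack = t :: ts := by
      cases stack with
      | nil => simp at hmatch
      | cons t ts => exact ⟨t, ts, rfl⟩
    have hm' : (t :: ts).head? = some order[idx] := hmatch
    have ht : t = order[idx] := by simpa using hm'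
    rw [loopB]
    simp only [dif_pos h]
    rw [if_pos hm']
    simp only [List.tail_cons] at ih ⊢
    rw [ih, List.drop_eq_getElem_cons h]
    refine (runR_congr _ _ _ _ _ _ ?_ _).symm
    simp [drain, ht]
  | case2 idx main stack count h want hmatch hle heq ih =>
    have hm' : ¬ stack.head? = some order[idx] := hmatch
    have he' : (main : Int) = order[idx] := heq
    rw [loopB]
    simp only [dif_pos h]
    rw [if_neg hm', if_pos hle, if_pos he', ih,
      List.drop_eq_getElem_cons h, boxes_cons main order.length hle]
    simp only [runR, drain_of_stab _ _ _ (stab_of_head? _ _ _ hm')]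
    refine (runR_congr _ _ _ _ _ _ ?_ _).symm
    simp [drain, ← he']
  | case3 idx main stack count h want hmatch hle hne ih =>
    have hm' : ¬ stack.head? = some order[idx] := hmatch
    have hn' : ¬ (main : Int) = order[idx] := hne
    rw [loopB]
    simp only [dif_pos h]
    rw [if_neg hm', if_pos hle, if_neg hn', ih,
      List.drop_eq_getElem_cons h, boxes_cons main order.length hle]
    simp only [runR, drain_of_stab _ _ _ (stab_of_head? _ _ _ hm')]
  | case4 idx main stack count h want hmatch hgt =>
    have hm' : ¬ stack.head? = some order[idx] := hmatch
    rw [loopB]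
    simp only [dif_pos h]
    rw [if_neg hm', if_neg hgt, List.drop_eq_getElem_cons h,
      boxes_hi main order.length (by omega)]
    simp only [runR, drain_of_stab _ _ _ (stab_of_head? _ _ _ hm')]
  | case5 idx main stack count h =>
    rw [loopB]
    simp only [dif_neg h]
    rw [List.drop_eq_nil_of_le (by omega), runR_nilw]

-- ===== VERDICT (by name: the statement is the Claim_ definition above) =====
theorem solution_spec : Claim_equal_solution := by
  intro order _
  unfold Spec_solution solution solution_alt
  rw [loopB_eq order 0 1 [] 0]
  have h := loopA_eq order 0 0 [] [] (by cases order <;> simp [Stab]) rfl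
  simp only [List.map_nil, List.nil_append] at h
  rw [h]
  simp [boxes]
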